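-- pv_equiv track=rewrite | github.com/lkj10/algorithm-study | kwangjin/9주차/find_root.py | solution
-- ===== SOURCE A (Python) =====
-- def solution(nodeinfo):
--
--     answer = []
--
--     preorder = []
--     postorder = []
--
--     def foo(List):
--         if List == []:
--             return
--         else:
--             root = max(List, key=lambda x: x[1])
--             L_List = []
--             R_List = []
--             preorder.append(root)
--             for i in List:
--                 if root[0] > i[0]:
--                     L_List.append(i)
--                 elif root[0] < i[0]:
--                     R_List.append(i)
--
--             foo(L_List)
--             foo(R_List)
--
--             postorder.append(root)
--
--         return
--
--     foo(nodeinfo)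
--
--     answer.append(list(map(lambda x: nodeinfo.index(x)+1, preorder)))
--     answer.append(list(map(lambda x: nodeinfo.index(x)+1, postorder)))
--
--     return answer
-- ===== SOURCE B (Python) =====
-- def solution(nodeinfo):
--     # Return-value equivalent rewrite: labels via a first-occurrence dict (no repeated
--     # .index scans), tree built once by inserting nodes in decreasing-y order (stable
--     # sort) into an x-keyed BST, then one preorder/postorder walk.
--     first = {}
--     for i, nd in enumerate(nodeinfo):
--         t = tuple(nd)
--         if t not in first:
--             first[t] = i + 1
--
--     def insert(t, nd):
--         if t is None:
--             return [nd, None, None]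
--         if nd[0] < t[0][0]:
--             t[1] = insert(t[1], nd)
--         elif nd[0] > t[0][0]:
--             t[2] = insert(t[2], nd)
--         return t
--
--     root = None
--     for nd in sorted(nodeinfo, key=lambda v: -v[1]):
--         root = insert(root, nd)
--
--     pre, post = [], []
--
--     def walk(t):
--         if t is None:
--             return
--         pre.append(first[tuple(t[0])])
--         walk(t[1])
--         walk(t[2])
--         post.append(first[tuple(t[0])])
--
--     walk(root)
--     return [pre, post]
-- ===== Notes on version B (the rewrite author's own statement) =====
-- stated objective: alternative
-- what changed: A repeatedly scans each sublist for the max-y root, partitions it, and maps every output node with a nodeinfo.index scan; B sorts once by decreasing y, builds the BST by keyed insertion, reads labels from a first-occurrence dict built in one pass, and emits both orders in a single walk.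
import Mathlib
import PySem

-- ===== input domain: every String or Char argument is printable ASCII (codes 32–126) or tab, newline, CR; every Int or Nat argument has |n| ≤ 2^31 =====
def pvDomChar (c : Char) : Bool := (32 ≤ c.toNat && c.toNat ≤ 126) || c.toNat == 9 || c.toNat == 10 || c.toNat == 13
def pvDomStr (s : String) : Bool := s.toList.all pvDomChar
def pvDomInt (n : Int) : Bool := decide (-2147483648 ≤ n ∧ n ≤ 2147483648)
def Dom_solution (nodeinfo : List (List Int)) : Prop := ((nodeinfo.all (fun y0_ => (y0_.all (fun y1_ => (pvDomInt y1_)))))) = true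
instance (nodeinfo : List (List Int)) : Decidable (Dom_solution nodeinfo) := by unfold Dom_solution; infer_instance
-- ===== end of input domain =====

-- B replaces A's per-level max scan, per-level partition and repeated nodeinfo.index
-- passes by one stable sort by decreasing y, BST insertion keyed on x, a first-occurrence
-- index dict and a single pre/post walk; return values identical on Pre_.

-- ===== PORT A =====
-- A's loop building L_List/R_List (ported as a fold over the pair of accumulators)
def fooPart (root : List Int) (L : List (List Int)) : List (List Int) × List (List Int) :=
  L.foldl (fun s i =>
    if PySem.List.pyGetD root 0 0 > PySem.List.pyGetD i 0 0 then (s.1 ++ [i], s.2)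
    else if PySem.List.pyGetD root 0 0 < PySem.List.pyGetD i 0 0 then (s.1, s.2 ++ [i])
    else s) ([], [])

-- the three lemmas below are cited by fooA's decreasing_by (termination of A's recursion)
lemma fooPart_eq (root : List Int) (L : List (List Int)) :
    fooPart root L = (L.filter (fun i => decide (PySem.List.pyGetD i 0 0 < PySem.List.pyGetD root 0 0)),
                      L.filter (fun i => decide (PySem.List.pyGetD root 0 0 < PySem.List.pyGetD i 0 0))) := by
  unfold fooPart
  have h1 : (fun (s : List (List Int) × List (List Int)) (i : List Int) =>
      if PySem.List.pyGetD root 0 0 > PySem.List.pyGetD i 0 0 then (s.1 ++ [i], s.2)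
      else if PySem.List.pyGetD root 0 0 < PySem.List.pyGetD i 0 0 then (s.1, s.2 ++ [i])
      else s)
      = (fun s i => (if PySem.List.pyGetD i 0 0 < PySem.List.pyGetD root 0 0 then s.1 ++ [i] else s.1,
                     if PySem.List.pyGetD root 0 0 < PySem.List.pyGetD i 0 0 then s.2 ++ [i] else s.2)) := by
    funext s i
    dsimp only
    split_ifs with h1 h2 h3 <;> first | rfl | (exfalso; omega)
  rw [h1, PySem.List.foldl_prod_mk
      (f := fun a (i : List Int) => if PySem.List.pyGetD i 0 0 < PySem.List.pyGetD root 0 0 then a ++ [i] else a)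
      (g := fun a (i : List Int) => if PySem.List.pyGetD root 0 0 < PySem.List.pyGetD i 0 0 then a ++ [i] else a)]
  rw [PySem.List.foldl_append_ite_eq_filter, PySem.List.foldl_append_ite_eq_filter]
  simp

lemma fooPart_fst_lt (root : List Int) (L : List (List Int)) (h : root ∈ L) :
    (fooPart root L).1.length < L.length := by
  rw [fooPart_eq]
  rw [List.length_filter_lt_length_iff_exists]
  exact ⟨root, h, by simp⟩

lemma fooPart_snd_lt (root : List Int) (L : List (List Int)) (h : root ∈ L) :
    (fooPart root L).2.length < L.length := by
  rw [fooPart_eq]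
  rw [List.length_filter_lt_length_iff_exists]
  exact ⟨root, h, by simp⟩

lemma max?_getD_mem (x : List Int) (t : List (List Int)) (k : List Int → Int) (d : List Int) :
    (PySem.List.max? (x :: t) k).getD d ∈ x :: t := by
  cases hm : PySem.List.max? (x :: t) k with
  | none => exact absurd ((PySem.List.max?_eq_none_iff _ _).1 hm) (by simp)
  | some m => simpa using PySem.List.max?_mem hm

-- A's recursive foo; preorder/postorder threaded as accumulators (A appends to them)
def fooA (L : List (List Int)) (pre post : List (List Int)) :
    List (List Int) × List (List Int) :=
  match L with
  | [] => (pre, post)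
  | x :: t =>
    let root := (PySem.List.max? (x :: t) (fun nd => PySem.List.pyGetD nd 1 0)).getD []
    let pr := fooPart root (x :: t)
    let ab := fooA pr.1 (pre ++ [root]) post
    let cd := fooA pr.2 ab.1 ab.2
    (cd.1, cd.2 ++ [root])
termination_by L.length
decreasing_by
  · exact fooPart_fst_lt _ _ (max?_getD_mem x t _ [])
  · exact fooPart_snd_lt _ _ (max?_getD_mem x t _ [])

def solution (nodeinfo : List (List Int)) : List (List Int) :=
  let answer : List (List Int) := []
  let pp := fooA nodeinfo [] []
  -- nodeinfo.index(x) never raises here: every x in preorder/postorder is from nodeinfo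
  let answer := answer ++ [pp.1.map (fun x => (((PySem.List.index? nodeinfo x).getD 0 : Nat) : Int) + 1)]
  let answer := answer ++ [pp.2.map (fun x => (((PySem.List.index? nodeinfo x).getD 0 : Nat) : Int) + 1)]
  answer

-- ===== PORT B =====
-- Source B's tree [val, left, right] / None
inductive PyTree where
  | leaf : PyTree
  | node : List Int → PyTree → PyTree → PyTree
deriving DecidableEq, Repr

def tinsert (t : PyTree) (nd : List Int) : PyTree :=
  match t with
  | .leaf => .node nd .leaf .leaf
  | .node v l r =>
    if PySem.List.pyGetD nd 0 0 < PySem.List.pyGetD v 0 0 then .node v (tinsert l nd) r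
    else if PySem.List.pyGetD nd 0 0 > PySem.List.pyGetD v 0 0 then .node v l (tinsert r nd)
    else .node v l r

-- Source B's first-occurrence dict (tuple(nd) keys are the lists themselves here)
def firstDict (nodeinfo : List (List Int)) : PySem.Dict (List Int) Int :=
  (PySem.List.enumerate nodeinfo 0).foldl
    (fun d p => if d.contains p.2 then d else d.insert p.2 (p.1 + 1)) PySem.Dict.empty

-- Source B's walk; pre/post threaded as accumulators
def walkB (first : PySem.Dict (List Int) Int) (t : PyTree) (pre post : List Int) :
    List Int × List Int :=
  match t with
  | .leaf => (pre, post)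
  | .node v l r =>
    let pre1 := pre ++ [first.getD v 0]
    let ab := walkB first l pre1 post
    let cd := walkB first r ab.1 ab.2
    (cd.1, cd.2 ++ [first.getD v 0])

def solution_alt (nodeinfo : List (List Int)) : List (List Int) :=
  let first := firstDict nodeinfo
  let t := (PySem.List.sorted nodeinfo (fun v => -(PySem.List.pyGetD v 1 0)) false).foldl tinsert .leaf
  let pp := walkB first t [] []
  [pp.1, pp.2]

-- ===== PRECONDITION & SPEC =====
-- Pre_ excludes exactly the inputs where some node list has fewer than 2 entries:
-- there Python A raises IndexError on nd[1] (and B raises likewise in its sort key).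
def Pre_solution (nodeinfo : List (List Int)) : Prop := ∀ l ∈ nodeinfo, 2 ≤ l.length
instance (nodeinfo : List (List Int)) : Decidable (Pre_solution nodeinfo) := by unfold Pre_solution; infer_instance

def pvWitness_solution : List (List Int) := [[5,3],[11,5],[13,3],[3,5],[6,1],[1,3],[8,6],[7,2],[2,2]]

def Spec_solution (nodeinfo : List (List Int)) (out : List (List Int)) : Prop := out = solution_alt nodeinfo
instance (nodeinfo : List (List Int)) (out : List (List Int)) : Decidable (Spec_solution nodeinfo out) := by unfold Spec_solution; infer_instance

-- ===== CLAIM (what is proved, stated in full; the proofs are below) =====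
def Claim_equal_solution : Prop := ∀ (nodeinfo : List (List Int)), Dom_solution nodeinfo → Pre_solution nodeinfo → Spec_solution nodeinfo (solution nodeinfo)

-- ===== LEMMAS AND PROOFS =====

-- abbreviations used only by the proofs
def pyX (nd : List Int) : Int := PySem.List.pyGetD nd 0 0
def pyY (nd : List Int) : Int := PySem.List.pyGetD nd 1 0
def negY (nd : List Int) : Int := -(PySem.List.pyGetD nd 1 0)

-- insertBy unfolding
lemma insertBy_cons (bef : List Int → List Int → Bool) (x y : List Int) (ys : List (List Int)) :
    PySem.List.insertBy bef x (y :: ys) = if bef x y then x :: y :: ys else y :: PySem.List.insertBy bef x ys := by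
  simp [PySem.List.insertBy]

lemma sorted_snoc (xs : List (List Int)) (x : List Int) :
    PySem.List.sorted (xs ++ [x]) negY false =
      PySem.List.insertBy (fun a b => decide (negY a < negY b)) x (PySem.List.sorted xs negY false) := by
  rw [PySem.List.sorted_eq_foldl_insertBy, PySem.List.sorted_eq_foldl_insertBy, List.foldl_append]
  rfl

-- head of the stable sort = Python's max(..., key=y) (first maximal element)
lemma sorted_head (x : List Int) (xs : List (List Int)) :
    ∃ t, PySem.List.sorted (x :: xs) negY false =
      (xs.foldl (fun m y => if pyY m < pyY y then y else m) x) :: t := by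
  induction xs using List.reverseRecOn with
  | nil => exact ⟨[], rfl⟩
  | append_singleton xs y ih =>
    obtain ⟨t, ht⟩ := ih
    have hx : x :: (xs ++ [y]) = (x :: xs) ++ [y] := by simp
    rw [hx, sorted_snoc, ht, insertBy_cons, List.foldl_append]
    set m := xs.foldl (fun m y => if pyY m < pyY y then y else m) x with hm
    by_cases h : pyY m < pyY y
    · have hd : decide (negY y < negY m) = true := by simp [negY]; simp [pyY] at h; omega
      rw [hd]
      simp only [List.foldl_cons, List.foldl_nil, if_pos h, if_true]
      exact ⟨m :: t, rfl⟩
    · have hd : decide (negY y < negY m) = false := by simp [negY]; simp [pyY] at h; omega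
      rw [hd]
      simp only [List.foldl_cons, List.foldl_nil, if_neg h]
      exact ⟨_, rfl⟩

lemma max?_cons_eq (x : List Int) (t : List (List Int)) :
    PySem.List.max? (x :: t) pyY = some (t.foldl (fun m y => if pyY m < pyY y then y else m) x) := by
  show List.foldl _ (some x) t = _
  induction t generalizing x with
  | nil => rfl
  | cons y ys ih => simp only [List.foldl_cons]; split <;> simp [ih]

-- filtering commutes with the stable sort
lemma insertBy_front (x : List Int) (acc : List (List Int))
    (h : ∀ y ∈ acc, negY x < negY y) :
    PySem.List.insertBy (fun a b => decide (negY a < negY b)) x acc = x :: acc := by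
  cases acc with
  | nil => rfl
  | cons a t => rw [insertBy_cons]; simp [h a (by simp)]

lemma filter_insertBy (p : List Int → Bool) (x : List Int) (acc : List (List Int))
    (hs : acc.Pairwise (fun u v => negY u ≤ negY v)) :
    (PySem.List.insertBy (fun a b => decide (negY a < negY b)) x acc).filter p =
      if p x then PySem.List.insertBy (fun a b => decide (negY a < negY b)) x (acc.filter p)
      else acc.filter p := by
  induction acc with
  | nil => by_cases h : p x <;> simp [PySem.List.insertBy, List.filter, h]
  | cons a t ih =>
    rw [List.pairwise_cons] at hs
    rw [insertBy_cons]
    by_cases hb : negY x < negY a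
    · rw [if_pos (by simpa using hb)]
      by_cases hp : p x
      · rw [if_pos hp]
        by_cases hpa : p a
        · simp only [List.filter_cons, hp, hpa, if_pos]
          rw [insertBy_cons]
          simp [hb]
        · simp only [List.filter_cons, hp, hpa, Bool.false_eq_true, if_pos]
          rw [insertBy_front]
          intro y hy
          exact lt_of_lt_of_le hb (hs.1 y (List.mem_of_mem_filter hy))
      · rw [if_neg hp]
        simp [List.filter_cons, hp]
    · rw [if_neg (by simpa using hb)]
      have ih' := ih hs.2
      by_cases hp : p x
      · rw [if_pos hp] at ih' ⊢
        by_cases hpa : p a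
        · simp only [List.filter_cons, hpa, if_pos, ih']
          rw [insertBy_cons, if_neg (by simpa using hb)]
        · simp [hpa, ih']
      · rw [if_neg hp] at ih' ⊢
        simp [List.filter_cons, ih']

lemma sorted_filter (p : List Int → Bool) (L : List (List Int)) :
    PySem.List.sorted (L.filter p) negY false = (PySem.List.sorted L negY false).filter p := by
  induction L using List.reverseRecOn with
  | nil => rfl
  | append_singleton xs x ih =>
    rw [List.filter_append, sorted_snoc]
    rw [filter_insertBy p x _ (PySem.List.sorted_pairwise xs negY)]
    by_cases hp : p x
    · simp only [hp, List.filter_cons, List.filter_nil, if_pos]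
      rw [← ih, ← sorted_snoc]
    · simp only [hp, Bool.false_eq_true, List.filter_cons, List.filter_nil, if_false, List.append_nil]
      simpa using ih

-- inserting a stream into a node splits into the two subtrees; equal x is dropped
lemma foldl_tinsert_node (ws : List (List Int)) (v : List Int) (tl tr : PyTree) :
    ws.foldl tinsert (.node v tl tr) =
      .node v ((ws.filter (fun nd => decide (pyX nd < pyX v))).foldl tinsert tl)
             ((ws.filter (fun nd => decide (pyX v < pyX nd))).foldl tinsert tr) := by
  induction ws generalizing tl tr with
  | nil => rfl
  | cons w ws ih =>
    simp only [List.foldl_cons, List.filter_cons]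
    by_cases h1 : pyX w < pyX v
    · have hw : tinsert (.node v tl tr) w = .node v (tinsert tl w) tr := by
        simp only [tinsert]
        rw [if_pos (by simpa [pyX] using h1)]
      rw [hw, ih]
      simp only [pyX] at h1 ⊢
      rw [if_pos (by simpa using h1), if_neg (by simp; omega)]
      simp
    · by_cases h2 : pyX v < pyX w
      · have hw : tinsert (.node v tl tr) w = .node v tl (tinsert tr w) := by
          simp only [tinsert]
          rw [if_neg (by simp [pyX] at h1; omega), if_pos (by simpa [pyX] using h2)]
        rw [hw, ih]
        simp only [pyX] at h1 h2 ⊢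
        rw [if_neg (by simpa using h1), if_pos (by simpa using h2)]
        simp
      · have hw : tinsert (.node v tl tr) w = .node v tl tr := by
          simp only [tinsert]
          rw [if_neg (by simp [pyX] at h1; omega), if_neg (by simp [pyX] at h2; omega)]
        rw [hw, ih]
        simp only [pyX] at h1 h2 ⊢
        rw [if_neg (by simpa using h1), if_neg (by simpa using h2)]

def preT : PyTree → List (List Int)
  | .leaf => []
  | .node v l r => v :: (preT l ++ preT r)

def postT : PyTree → List (List Int)
  | .leaf => []
  | .node v l r => postT l ++ postT r ++ [v]

lemma mem_postT_iff (t : PyTree) (v : List Int) : v ∈ postT t ↔ v ∈ preT t := by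
  induction t with
  | leaf => simp [preT, postT]
  | node w l r ihl ihr => simp [preT, postT, ihl, ihr]; tauto

lemma mem_preT_tinsert {t : PyTree} {nd v : List Int} (h : v ∈ preT (tinsert t nd)) :
    v = nd ∨ v ∈ preT t := by
  induction t with
  | leaf => simp [tinsert, preT] at h; simp [h]
  | node w l r ihl ihr =>
    simp only [tinsert] at h
    split at h
    · simp [preT] at h ⊢; rcases h with h | h | h
      · tauto
      · rcases ihl h with h | h <;> tauto
      · tauto
    · split at h
      · simp [preT] at h ⊢; rcases h with h | h | h
        · tauto
        · tauto
        · rcases ihr h with h | h <;> tauto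
      · tauto

lemma mem_preT_foldl {ws : List (List Int)} {t : PyTree} {v : List Int}
    (h : v ∈ preT (ws.foldl tinsert t)) : v ∈ preT t ∨ v ∈ ws := by
  induction ws generalizing t with
  | nil => exact Or.inl h
  | cons w ws ih =>
    rcases ih h with h' | h'
    · rcases mem_preT_tinsert h' with h'' | h'' <;> simp [h'']
    · simp [h']

def mkT (L : List (List Int)) : PyTree :=
  (PySem.List.sorted L negY false).foldl tinsert .leaf

-- MAIN LEMMA: A's recursion computes the traversals of B's tree
lemma fooA_eq (n : Nat) (L : List (List Int)) (hn : L.length ≤ n) (pre post : List (List Int)) :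
    fooA L pre post = (pre ++ preT (mkT L), post ++ postT (mkT L)) := by
  induction n generalizing L pre post with
  | zero =>
    have hL : L = [] := List.eq_nil_of_length_eq_zero (Nat.le_zero.1 hn)
    subst hL
    simp [fooA, mkT, preT, postT, PySem.List.sorted]
  | succ n ih =>
    cases L with
    | nil => simp [fooA, mkT, preT, postT, PySem.List.sorted]
    | cons x t =>
      obtain ⟨ts, hts⟩ := sorted_head x t
      set m := t.foldl (fun m y => if pyY m < pyY y then y else m) x with hmdef
      have hroot : (PySem.List.max? (x :: t) (fun nd => PySem.List.pyGetD nd 1 0)).getD ([] : List Int) = m := by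
        rw [show (fun nd => PySem.List.pyGetD nd 1 0) = pyY from rfl, max?_cons_eq]
        rfl
      have hmem : m ∈ x :: t := by
        have h := PySem.List.max?_mem (max?_cons_eq x t)
        exact h
      set p := fun nd => decide (PySem.List.pyGetD nd 0 0 < PySem.List.pyGetD m 0 0) with hp
      set q := fun nd => decide (PySem.List.pyGetD m 0 0 < PySem.List.pyGetD nd 0 0) with hq
      have hpm : p m = false := by simp [hp]
      have hqm : q m = false := by simp [hq]
      -- the two sublists are shorter
      have hlp : ((x :: t).filter p).length ≤ n := by
        have h1 : ((x :: t).filter p).length < (x :: t).length :=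
          List.length_filter_lt_length_iff_exists.2 ⟨m, hmem, by simp [hpm]⟩
        omega
      have hlq : ((x :: t).filter q).length ≤ n := by
        have h1 : ((x :: t).filter q).length < (x :: t).length :=
          List.length_filter_lt_length_iff_exists.2 ⟨m, hmem, by simp [hqm]⟩
        omega
      -- the tree splits at m
      have hsplit : mkT (x :: t) = .node m (mkT ((x :: t).filter p)) (mkT ((x :: t).filter q)) := by
        unfold mkT
        rw [hts, List.foldl_cons]
        rw [show tinsert PyTree.leaf m = PyTree.node m .leaf .leaf from rfl]
        rw [foldl_tinsert_node]
        rw [sorted_filter p (x :: t), sorted_filter q (x :: t), hts]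
        rw [List.filter_cons_of_neg (by simp [hpm]), List.filter_cons_of_neg (by simp [hqm])]
        rfl
      rw [fooA]
      simp only [hroot, fooPart_eq, ← hp, ← hq]
      rw [ih _ hlp, ih _ hlq]
      rw [hsplit]
      simp [preT, postT]

lemma walkB_eq (first : PySem.Dict (List Int) Int) (t : PyTree) (pre post : List Int) :
    walkB first t pre post = (pre ++ (preT t).map (fun v => first.getD v 0),
                              post ++ (postT t).map (fun v => first.getD v 0)) := by
  induction t generalizing pre post with
  | leaf => simp [walkB, preT, postT]
  | node v l r ihl ihr => simp [walkB, preT, postT, ihl, ihr]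

-- the first-occurrence dict agrees with repeated nodeinfo.index
lemma enum_cons (x : List Int) (xs : List (List Int)) (i : Int) :
    PySem.List.enumerate (x :: xs) i = (i, x) :: PySem.List.enumerate xs (i + 1) := by
  simp [PySem.List.enumerate]

lemma firstDict_stable (xs : List (List Int)) (v : List Int) :
    ∀ (i : Int) (d : PySem.Dict (List Int) Int), d.contains v = true →
      ((PySem.List.enumerate xs i).foldl
        (fun d p => if d.contains p.2 then d else d.insert p.2 (p.1 + 1)) d).getD v 0 = d.getD v 0 := by
  induction xs with
  | nil => intro i d _; rfl
  | cons x xs ih =>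
    intro i d hc
    rw [enum_cons, List.foldl_cons]
    dsimp only
    by_cases hx : x = v
    · subst hx
      simp only [hc, if_true]
      exact ih _ _ hc
    · by_cases hcx : d.contains x
      · simp only [hcx, if_true]; exact ih _ _ hc
      · simp only [hcx, Bool.false_eq_true, if_false]
        rw [ih _ _ (by rw [PySem.Dict.contains_insert]; simp [hc])]
        rw [PySem.Dict.getD_insert]
        simp [Ne.symm hx]

lemma firstDict_go (xs : List (List Int)) (v : List Int) (hv : v ∈ xs) :
    ∀ (i : Int) (d : PySem.Dict (List Int) Int), d.contains v = false →
      ((PySem.List.enumerate xs i).foldl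
        (fun d p => if d.contains p.2 then d else d.insert p.2 (p.1 + 1)) d).getD v 0
      = i + (((PySem.List.index? xs v).getD 0 : Nat) : Int) + 1 := by
  induction xs with
  | nil => cases hv
  | cons x xs ih =>
    intro i d hc
    rw [enum_cons, List.foldl_cons]
    dsimp only
    by_cases hx : x = v
    · subst hx
      simp only [hc, Bool.false_eq_true, if_false]
      rw [firstDict_stable _ _ _ _ (PySem.Dict.contains_insert_self d _ (i+1))]
      rw [PySem.Dict.getD_insert, if_pos rfl]
      rw [PySem.List.index?_cons_self]
      simp
    · have hv' : v ∈ xs := by rcases List.mem_cons.1 hv with h | h; exact absurd h.symm hx; exact h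
      have hrec : ∀ (d' : PySem.Dict (List Int) Int), d'.contains v = false →
          ((PySem.List.enumerate xs (i+1)).foldl
            (fun d p => if d.contains p.2 then d else d.insert p.2 (p.1 + 1)) d').getD v 0
          = (i+1) + (((PySem.List.index? xs v).getD 0 : Nat) : Int) + 1 := fun d' h => ih hv' _ d' h
      obtain ⟨k, hk⟩ := Option.isSome_iff_exists.1 ((PySem.List.index?_isSome_iff xs v).2 hv')
      rw [PySem.List.index?_cons_of_ne xs (fun h => hx h)]
      by_cases hcx : d.contains x
      · simp only [hcx, if_true]
        rw [hrec d hc, hk]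
        simp; ring
      · simp only [hcx, Bool.false_eq_true, if_false]
        rw [hrec _ (by rw [PySem.Dict.contains_insert]; simp [hc]; exact fun h => hx h.symm)]
        rw [hk]
        simp; ring

lemma firstDict_getD (nodeinfo : List (List Int)) (v : List Int) (hv : v ∈ nodeinfo) :
    (firstDict nodeinfo).getD v 0 = (((PySem.List.index? nodeinfo v).getD 0 : Nat) : Int) + 1 := by
  unfold firstDict
  rw [firstDict_go nodeinfo v hv 0 _ (by rfl)]
  ring

-- ===== VERDICT (by name: the statement is the Claim_ definition above) =====
lemma mem_nodeinfo_of_mem_preT (nodeinfo : List (List Int)) (v : List Int)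
    (h : v ∈ preT (mkT nodeinfo)) : v ∈ nodeinfo := by
  unfold mkT at h
  rcases mem_preT_foldl h with h' | h'
  · simp [preT] at h'
  · exact (PySem.List.mem_sorted _ _ _ _).1 h'

theorem solution_spec : Claim_equal_solution := by
  intro nodeinfo _ _
  unfold Spec_solution solution solution_alt
  dsimp only
  rw [fooA_eq nodeinfo.length nodeinfo le_rfl]
  rw [show (PySem.List.sorted nodeinfo (fun v => -(PySem.List.pyGetD v 1 0)) false).foldl tinsert .leaf
        = mkT nodeinfo from rfl]
  rw [walkB_eq]
  simp only [List.nil_append]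
  have hpre : (preT (mkT nodeinfo)).map
        (fun x => (((PySem.List.index? nodeinfo x).getD 0 : Nat) : Int) + 1)
      = (preT (mkT nodeinfo)).map (fun v => (firstDict nodeinfo).getD v 0) :=
    List.map_congr_left (fun v hv =>
      (firstDict_getD nodeinfo v (mem_nodeinfo_of_mem_preT nodeinfo v hv)).symm)
  have hpost : (postT (mkT nodeinfo)).map
        (fun x => (((PySem.List.index? nodeinfo x).getD 0 : Nat) : Int) + 1)
      = (postT (mkT nodeinfo)).map (fun v => (firstDict nodeinfo).getD v 0) :=
    List.map_congr_left (fun v hv =>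
      (firstDict_getD nodeinfo v (mem_nodeinfo_of_mem_preT nodeinfo v
        ((mem_postT_iff _ v).1 hv))).symm)
  rw [hpre, hpost]
  rfl
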